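-- pv_equiv track=rewrite | github.com/shihsyun/codility_lessons | Lesson14/min_max_division.py | solution
-- ===== SOURCE A (Python) =====
-- def check(A, K, max_block_sum):
--     block_sum = 0
--     count = 0
--
--     for elem in A:
--         if block_sum + elem > max_block_sum:
--             block_sum = elem
--             count += 1
--         else:
--             block_sum += elem
--
--         if count >= K:
--             return False
--
--     return True
--
-- def solution(K, M, A):
--
--     lower_bound = max(A)
--     upper_bound = sum(A)
--
--     if K == 1:
--         return upper_bound
--
--     if K >= len(A):
--         return lower_bound
--
--     while lower_bound <= upper_bound:
--         possible_candidate = (lower_bound + upper_bound) // 2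
--
--         if check(A, K, possible_candidate):
--             upper_bound = possible_candidate - 1
--         else:
--             lower_bound = possible_candidate + 1
--
--     return lower_bound
-- ===== SOURCE B (Python) =====
-- def solution(K, M, A):
--     total = sum(A)
--     lowest = max(A)
--
--     if K == 1:
--         return total
--
--     if K >= len(A):
--         return lowest
--
--     def blocks(cap):
--         # greedy block count as a pure fold: (count, current block sum)
--         b, s = 1, 0
--         for x in A:
--             b, s = (b + 1, x) if s + x > cap else (b, s + x)
--         return b
--
--     def search(lo, hi):
--         if hi < lo:
--             return lo
--         mid = (lo + hi) // 2
--         if blocks(mid) <= K: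
--             return search(lo, mid - 1)
--         return search(mid + 1, hi)
--
--     return search(lowest, total)
-- ===== Notes on version B (the rewrite author's own statement) =====
-- stated objective: alternative
-- what changed: A's early-exit boolean feasibility check with mutable counters becomes a pure fold computing the greedy block count (compared to K only once, after the scan), and the imperative while-loop bisection with mutated bounds becomes a tail-recursive interval search; the bisection itself must be kept because on lists with negative elements A's check is non-monotone and the returned value is pinned to the exact probe sequence.
import Mathlib
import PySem

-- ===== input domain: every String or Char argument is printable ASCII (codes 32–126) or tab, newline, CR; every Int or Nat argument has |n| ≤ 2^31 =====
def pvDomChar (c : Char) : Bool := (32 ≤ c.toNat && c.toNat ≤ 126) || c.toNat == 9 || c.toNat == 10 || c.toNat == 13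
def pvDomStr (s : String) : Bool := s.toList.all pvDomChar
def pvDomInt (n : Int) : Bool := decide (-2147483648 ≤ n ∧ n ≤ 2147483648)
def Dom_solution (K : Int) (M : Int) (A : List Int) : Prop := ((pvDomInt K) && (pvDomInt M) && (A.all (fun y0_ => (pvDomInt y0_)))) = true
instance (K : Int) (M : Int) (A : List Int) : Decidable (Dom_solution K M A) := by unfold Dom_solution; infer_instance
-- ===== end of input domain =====

-- B replaces the early-exit check loop by a pure fold computing the greedy block count and the
-- mutable-bounds while loop by a tail-recursive interval search; same cost (objective: alternative).

-- ===== PORT A =====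
-- check(A, K, max_block_sum): early-exit loop over A with state (block_sum, count)
def checkA (cap : Int) (K : Int) : List Int → Int → Int → Bool
  | [], _, _ => true
  | x :: rest, blockSum, count =>
    let p : Int × Int := if blockSum + x > cap then (x, count + 1) else (blockSum + x, count)
    if p.2 ≥ K then false else checkA cap K rest p.1 p.2

-- the 'while lower_bound <= upper_bound' loop of A; the Nat fuel only makes the loop total:
-- called with fuel = (upper + 1 - lower).toNat, which bounds the number of iterations
-- (each iteration shrinks the interval), so the 0-fuel branch is only reached with lower > upper
def loopA (A : List Int) (K : Int) : Nat → Int → Int → Int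
  | 0, lower, _ => lower
  | fuel + 1, lower, upper =>
    if lower ≤ upper then
      let mid := PySem.Int.floordiv (lower + upper) 2
      if checkA mid K A 0 0 then loopA A K fuel lower (mid - 1)
      else loopA A K fuel (mid + 1) upper
    else lower

def solution (K : Int) (M : Int) (A : List Int) : Int :=
  let lower := (PySem.List.max? A (fun y => y)).getD 0   -- max(A); none (ValueError on []) excluded by Pre_
  let upper := A.sum
  if K == 1 then upper
  else if K ≥ (A.length : Int) then lower
  else loopA A K (upper + 1 - lower).toNat lower upper

-- ===== PORT B =====
-- blocks(cap): greedy block count as a single pure fold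
def blocksB (A : List Int) (cap : Int) : Int :=
  (A.foldl (fun (p : Int × Int) x => if p.2 + x > cap then (p.1 + 1, x) else (p.1, p.2 + x)) (1, 0)).1

-- B's recursive interval search; Nat fuel is a totality guard only (fuel = interval length
-- bounds the recursion depth; the 0-fuel branch is only reached with hi < lo)
def searchB (A : List Int) (K : Int) : Nat → Int → Int → Int
  | 0, lo, _ => lo
  | fuel + 1, lo, hi =>
    if hi < lo then lo
    else
      let mid := PySem.Int.floordiv (lo + hi) 2
      if blocksB A mid ≤ K then searchB A K fuel lo (mid - 1)
      else searchB A K fuel (mid + 1) hi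

def solution_alt (K : Int) (M : Int) (A : List Int) : Int :=
  let total := A.sum
  let lowest := (PySem.List.max? A (fun y => y)).getD 0   -- max(A); none (ValueError on []) excluded by Pre_
  if K == 1 then total
  else if K ≥ (A.length : Int) then lowest
  else searchB A K (total + 1 - lowest).toNat lowest total

-- ===== PRECONDITION & SPEC =====
-- Pre_ excludes only the empty list, on which both Pythons raise ValueError at max(A).
def Pre_solution (K : Int) (M : Int) (A : List Int) : Prop := A ≠ []
instance (K : Int) (M : Int) (A : List Int) : Decidable (Pre_solution K M A) := by unfold Pre_solution; infer_instance
def pvWitness_solution : Int × Int × List Int := (2, 0, [3, 1, 2, 4])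

def Spec_solution (K : Int) (M : Int) (A : List Int) (out : Int) : Prop := out = solution_alt K M A
instance (K : Int) (M : Int) (A : List Int) (out : Int) : Decidable (Spec_solution K M A out) := by unfold Spec_solution; infer_instance

-- ===== CLAIM (what is proved, stated in full; the proofs are below) =====
def Claim_equal_solution : Prop := ∀ (K : Int) (M : Int) (A : List Int), Dom_solution K M A → Pre_solution K M A → Spec_solution K M A (solution K M A)

-- ===== LEMMAS AND PROOFS =====

-- the fold step of blocksB, named for the lemmas
def stepB (cap : Int) (p : Int × Int) (x : Int) : Int × Int :=
  if p.2 + x > cap then (p.1 + 1, x) else (p.1, p.2 + x)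

theorem blocksB_eq_foldl (A : List Int) (cap : Int) :
    blocksB A cap = (A.foldl (stepB cap) (1, 0)).1 := rfl

-- the count component of the fold never decreases
theorem foldl_stepB_count_mono (cap : Int) (xs : List Int) :
    ∀ c s : Int, c ≤ (xs.foldl (stepB cap) (c, s)).1 := by
  induction xs with
  | nil => intro c s; simp
  | cons x rest ih =>
    intro c s
    simp only [List.foldl_cons, stepB]
    split
    · exact le_trans (by omega) (ih (c + 1) x)
    · exact ih c (s + x)

-- early-exit check = (final count < K), for a nonempty list
theorem checkA_eq_count (cap K : Int) (xs : List Int) (hne : xs ≠ []) :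
    ∀ c s : Int, checkA cap K xs s c = decide ((xs.foldl (stepB cap) (c, s)).1 < K) := by
  induction xs with
  | nil => exact absurd rfl hne
  | cons x rest ih =>
    intro c s
    simp only [checkA, List.foldl_cons, stepB]
    by_cases hx : s + x > cap
    · simp only [if_pos hx]
      by_cases hK : c + 1 ≥ K
      · simp only [if_pos hK]
        have := foldl_stepB_count_mono cap rest (c + 1) x
        symm; simp only [decide_eq_false_iff_not]; omega
      · simp only [if_neg hK]
        cases rest with
        | nil => simp [checkA]; omega
        | cons y t => exact ih (by simp) (c + 1) x
    · simp only [if_neg hx]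
      by_cases hK : c ≥ K
      · simp only [if_pos hK]
        have := foldl_stepB_count_mono cap rest c (s + x)
        symm; simp only [decide_eq_false_iff_not]; omega
      · simp only [if_neg hK]
        cases rest with
        | nil => simp [checkA]; omega
        | cons y t => exact ih (by simp) c (s + x)

-- hence A's check is exactly B's 'block count ≤ K' test
theorem checkA_eq_blocksB (A : List Int) (K cap : Int) (hne : A ≠ []) :
    checkA cap K A 0 0 = decide (blocksB A cap ≤ K) := by
  have hshift : ∀ (xs : List Int) (c s : Int),
      (xs.foldl (stepB cap) (c + 1, s)).1 = (xs.foldl (stepB cap) (c, s)).1 + 1 := by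
    intro xs
    induction xs with
    | nil => intro c s; simp
    | cons x rest ih =>
      intro c s
      simp only [List.foldl_cons, stepB]
      split
      · exact ih (c + 1) x
      · exact ih c (s + x)
  rw [checkA_eq_count cap K A hne 0 0, blocksB_eq_foldl]
  have := hshift A 0 0
  simp only [zero_add] at this
  rw [this]
  by_cases h : (A.foldl (stepB cap) (0, 0)).1 < K
  · simp [h]
  · simp [h]

-- the two bisections agree (same fuel, same interval)
theorem loopA_eq_searchB (A : List Int) (K : Int) (hne : A ≠ []) :
    ∀ (fuel : Nat) (lo hi : Int), loopA A K fuel lo hi = searchB A K fuel lo hi := by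
  intro fuel
  induction fuel with
  | zero => intro lo hi; rfl
  | succ n ih =>
    intro lo hi
    rw [loopA, searchB]
    by_cases h : lo ≤ hi
    · simp only [if_pos h, if_neg (not_lt.mpr h), checkA_eq_blocksB A K _ hne]
      by_cases hc : blocksB A (PySem.Int.floordiv (lo + hi) 2) ≤ K
      · simp only [hc, decide_true, if_true]
        exact ih _ _
      · simp only [hc, decide_false, if_false]
        exact ih _ _
    · simp only [if_neg h, if_pos (lt_of_not_ge h)]

-- ===== VERDICT (by name: the statement is the Claim_ definition above) =====
theorem solution_spec : Claim_equal_solution := by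
  intro K M A _ hpre
  unfold Spec_solution solution solution_alt
  simp only []
  by_cases h1 : K == 1
  · simp [h1]
  · simp only [h1, Bool.false_eq_true, if_false]
    by_cases h2 : K ≥ (A.length : Int)
    · simp [h2]
    · simp only [h2, if_false]
      exact loopA_eq_searchB A K hpre _ _ _
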